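-- pv_equiv track=rewrite | github.com/apri-me/math_logic_toolkit | truth_function_generator.py | find_parens
-- ===== SOURCE A (Python) =====
-- def find_parens(s):
--     matchings = []
--     pstack = []
--
--     for i, c in enumerate(s):
--         if c == '(':
--             pstack.append(i)
--         elif c == ')':
--             if len(pstack) == 0:
--                 raise IndexError("No matching closing parens at: " + str(i))
--             elif len(pstack) == 1:
--                 matchings.append((pstack.pop(), i))
--             else:
--                 pstack.pop()
--
--     return matchings
-- ===== SOURCE B (Python) =====
-- def find_parens(s):
--     matchings = []
--     n = len(s)
--     i = 0
--     while i < n: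
--         c = s[i]
--         if c == ')':
--             raise IndexError("No matching closing parens at: " + str(i))
--         if c == '(':
--             j = i + 1
--             depth = 1
--             while j < n and depth > 0:
--                 if s[j] == '(':
--                     depth += 1
--                 elif s[j] == ')':
--                     depth -= 1
--                 j += 1
--             if depth == 0:
--                 matchings.append((i, j - 1))
--             i = j
--         else:
--             i += 1
--     return matchings
-- ===== Notes on version B (the rewrite author's own statement) =====
-- stated objective: alternative
-- what changed: Replaces A's single stack-fold by a two-level scan: an outer loop over top-level positions that, at each top-level '(', runs an inner depth-counting scan to locate the matching ')' and then jumps past the whole group, so no stack of indices is ever kept.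
import Mathlib
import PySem

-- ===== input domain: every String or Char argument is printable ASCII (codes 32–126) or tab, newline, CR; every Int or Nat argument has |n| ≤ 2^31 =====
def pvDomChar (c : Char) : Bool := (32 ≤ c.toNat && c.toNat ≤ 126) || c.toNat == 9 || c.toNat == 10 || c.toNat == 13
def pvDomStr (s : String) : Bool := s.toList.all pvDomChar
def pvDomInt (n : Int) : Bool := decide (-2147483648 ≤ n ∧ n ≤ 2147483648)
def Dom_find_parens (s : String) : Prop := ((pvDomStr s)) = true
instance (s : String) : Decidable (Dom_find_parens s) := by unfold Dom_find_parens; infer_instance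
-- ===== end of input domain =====

-- B replaces A's single stack-fold by an outer top-level scan that, at each top-level '(',
-- runs an inner matching scan to find the close and jumps past it (simpler; no stack kept).

-- ===== PORT A =====
-- one iteration of A's for-loop: state = (matchings, pstack); pstack grows/shrinks at its end
def find_parens_step (st : List (Int × Int) × List Int) (ic : Int × Char) :
    List (Int × Int) × List Int :=
  let matchings := st.1
  let pstack := st.2
  let i := ic.1
  let c := ic.2
  if c = '(' then (matchings, pstack ++ [i])
  else if c = ')' then
    if pstack.length = 0 then (matchings, pstack)  -- Python: raise IndexError; excluded by Pre_
    else if pstack.length = 1 then (matchings ++ [(pstack.getLast!, i)], pstack.dropLast)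
    else (matchings, pstack.dropLast)
  else (matchings, pstack)

def find_parens (s : String) : List (Int × Int) :=
  (List.foldl find_parens_step ([], []) (PySem.List.enumerate s.toList)).1

-- ===== PORT B =====
-- B's inner while loop: from list l at position j with nesting depth d, consume characters
-- while depth > 0; returns (final j, final depth, unconsumed rest)
def scan_close (l : List Char) (j d : Int) : Int × Int × List Char :=
  match l with
  | [] => (j, d, [])
  | c :: rest =>
    if d = 0 then (j, d, c :: rest)
    else scan_close rest (j + 1) (if c = '(' then d + 1 else if c = ')' then d - 1 else d)

-- the unconsumed rest never grows (termination measure for the outer loop)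
lemma scan_close_len_le (l : List Char) (j d : Int) :
    (scan_close l j d).2.2.length ≤ l.length := by
  induction l generalizing j d with
  | nil => simp [scan_close]
  | cons c rest ih =>
    simp only [scan_close]
    split
    · simp
    · exact le_trans (ih _ _) (by simp)

-- B's outer while loop over the unscanned suffix l starting at absolute index i
def find_parens_outer (l : List Char) (i : Int) (acc : List (Int × Int)) : List (Int × Int) :=
  match l with
  | [] => acc
  | c :: rest =>
    if c = ')' then acc  -- Python: raise IndexError; excluded by Pre_
    else if c = '(' then
      let r := scan_close rest (i + 1) 1
      find_parens_outer r.2.2 r.1 (if r.2.1 = 0 then acc ++ [(i, r.1 - 1)] else acc)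
    else find_parens_outer rest (i + 1) acc
termination_by l.length
decreasing_by
  · exact Nat.lt_succ_of_le (scan_close_len_le rest (i + 1) 1)
  · simp

def find_parens_alt (s : String) : List (Int × Int) :=
  find_parens_outer s.toList 0 []

-- ===== PRECONDITION & SPEC =====
-- Pre_ excludes exactly the strings in which some prefix holds more closing than opening
-- parentheses: there the Python A raises IndexError, and the Python B raises the same.
def Pre_find_parens (s : String) : Prop :=
  ∀ n ∈ List.range (s.toList.length + 1),
    (s.toList.take n).count ')' ≤ (s.toList.take n).count '('
instance (s : String) : Decidable (Pre_find_parens s) := by unfold Pre_find_parens; infer_instance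

def pvWitness_find_parens : String := "(a(b))(c)"

def Spec_find_parens (s : String) (out : List (Int × Int)) : Prop := out = find_parens_alt s
instance (s : String) (out : List (Int × Int)) : Decidable (Spec_find_parens s out) := by unfold Spec_find_parens; infer_instance

-- ===== CLAIM (what is proved, stated in full; the proofs are below) =====
def Claim_equal_find_parens : Prop := ∀ (s : String), Dom_find_parens s → Pre_find_parens s → Spec_find_parens s (find_parens s)

-- ===== LEMMAS AND PROOFS =====

lemma scan_close_zero (l : List Char) (j : Int) : scan_close l j 0 = (j, 0, l) := by
  cases l <;> simp [scan_close]

-- decomposition: scan_close consumes a prefix t and reports the resulting index and depth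
lemma scan_close_spec (l : List Char) (j d : Int) :
    ∃ t : List Char, l = t ++ (scan_close l j d).2.2 ∧
      (scan_close l j d).1 = j + t.length ∧
      (scan_close l j d).2.1 = d + t.count '(' - t.count ')' := by
  induction l generalizing j d with
  | nil => exact ⟨[], by simp [scan_close]⟩
  | cons c rest ih =>
    by_cases hd : d = 0
    · exact ⟨[], by simp [scan_close, hd]⟩
    · obtain ⟨t, h1, h2, h3⟩ := ih (j + 1) (if c = '(' then d + 1 else if c = ')' then d - 1 else d)
      refine ⟨c :: t, ?_, ?_, ?_⟩
      · simp only [scan_close, hd, if_false]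
        exact congrArg (c :: ·) h1
      · simp only [scan_close, hd, if_false] at h2 ⊢
        simp [h2]; ring
      · simp only [scan_close, hd, if_false] at h3 ⊢
        rw [h3]
        by_cases hc1 : c = '(' <;> by_cases hc2 : c = ')' <;>
          simp [hc1, hc2] <;> ring

-- if the scan stops with nonzero depth, the whole list was consumed
lemma scan_close_rest_nil (l : List Char) (j d : Int) (hd : d ≠ 0)
    (h : (scan_close l j d).2.1 ≠ 0) : (scan_close l j d).2.2 = [] := by
  induction l generalizing j d with
  | nil => simp [scan_close]
  | cons c rest ih =>
    simp only [scan_close, hd, if_false] at h ⊢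
    by_cases h0 : (if c = '(' then d + 1 else if c = ')' then d - 1 else d) = 0
    · rw [h0] at h ⊢; rw [scan_close_zero] at h; exact absurd rfl h
    · exact ih _ _ h0 h

-- A's fold with a nonempty stack (bottom element `start`, height stk.length+1) over the
-- enumeration of l from j computes what B's inner scan determines
lemma scan_fold (l : List Char) (j : Int) (stk : List Int) (start : Int)
    (ms : List (Int × Int)) :
    (List.foldl find_parens_step (ms, start :: stk) (PySem.List.enumerate l j)).1 =
    (if (scan_close l j ((stk.length : Int) + 1)).2.1 = 0 then
      (List.foldl find_parens_step
        (ms ++ [(start, (scan_close l j ((stk.length : Int) + 1)).1 - 1)], ([] : List Int))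
        (PySem.List.enumerate (scan_close l j ((stk.length : Int) + 1)).2.2
          (scan_close l j ((stk.length : Int) + 1)).1)).1
     else ms) := by
  induction l generalizing j stk ms with
  | nil =>
    have : ((stk.length : Int) + 1) ≠ 0 := by positivity
    simp [scan_close, PySem.List.enumerate, this]
  | cons c rest ih =>
    have hd : ((stk.length : Int) + 1) ≠ 0 := by positivity
    rw [PySem.List.enumerate_cons]
    simp only [List.foldl_cons]
    by_cases hop : c = '('
    · rw [show find_parens_step (ms, start :: stk) (j, c) = (ms, start :: (stk ++ [j])) by
        simp [find_parens_step, hop]]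
      rw [show scan_close (c :: rest) j ((stk.length : Int) + 1)
            = scan_close rest (j + 1) (((stk ++ [j]).length : Int) + 1) by
        simp [scan_close, hd, hop]]
      exact ih (j + 1) (stk ++ [j]) ms
    · by_cases hcl : c = ')'
      · rw [show scan_close (c :: rest) j ((stk.length : Int) + 1)
              = scan_close rest (j + 1) ((stk.length : Int) + 1 - 1) by
          simp [scan_close, hd, hcl]]
        cases stk with
        | nil =>
          rw [show find_parens_step (ms, [start]) (j, c)
                = (ms ++ [(start, j)], ([] : List Int)) by
            simp [find_parens_step, hcl, List.getLast!]]
          rw [show ((([] : List Int).length : Int) + 1 - 1) = 0 by simp]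
          rw [scan_close_zero]
          simp
        | cons y ys =>
          rw [show find_parens_step (ms, start :: y :: ys) (j, c)
                = (ms, start :: (y :: ys).dropLast) by
            have : (start :: y :: ys).length ≠ 0 := by simp
            have : (start :: y :: ys).length ≠ 1 := by simp
            simp [find_parens_step, hcl, List.dropLast]]
          rw [show ((((y :: ys) : List Int).length : Int) + 1 - 1)
                = (((y :: ys).dropLast.length : Int) + 1) by
            simp [List.length_dropLast]]
          exact ih (j + 1) (y :: ys).dropLast ms
      · rw [show find_parens_step (ms, start :: stk) (j, c) = (ms, start :: stk) by
          simp [find_parens_step, hop, hcl]]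
        rw [show scan_close (c :: rest) j ((stk.length : Int) + 1)
              = scan_close rest (j + 1) ((stk.length : Int) + 1) by
          simp [scan_close, hd, hop, hcl]]
        exact ih (j + 1) stk ms

-- top level: A's fold with an empty stack equals B's outer loop, given that no prefix of the
-- remaining text has more ')' than '('
lemma top_equiv (N : Nat) (l : List Char) (hN : l.length ≤ N) (i : Int)
    (acc : List (Int × Int))
    (hbal : ∀ n : Nat, (l.take n).count ')' ≤ (l.take n).count '(') :
    (List.foldl find_parens_step (acc, ([] : List Int)) (PySem.List.enumerate l i)).1 =
    find_parens_outer l i acc := by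
  induction N generalizing l i acc with
  | zero =>
    have : l = [] := List.eq_nil_of_length_eq_zero (Nat.le_zero.mp hN)
    subst this
    simp [find_parens_outer, PySem.List.enumerate]
  | succ N ih =>
    cases l with
    | nil => simp [find_parens_outer, PySem.List.enumerate]
    | cons c rest =>
      by_cases hcl : c = ')'
      · exfalso
        have := hbal 1
        simp [hcl] at this
      · by_cases hop : c = '('
        · rw [PySem.List.enumerate_cons]
          simp only [List.foldl_cons]
          rw [show find_parens_step (acc, ([] : List Int)) (i, c) = (acc, [i]) by
            simp [find_parens_step, hop]]
          rw [show find_parens_outer (c :: rest) i acc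
                = find_parens_outer (scan_close rest (i + 1) 1).2.2
                    (scan_close rest (i + 1) 1).1
                    (if (scan_close rest (i + 1) 1).2.1 = 0
                     then acc ++ [(i, (scan_close rest (i + 1) 1).1 - 1)] else acc) by
            rw [find_parens_outer]; simp [hop]]
          have hfold := scan_fold rest (i + 1) [] i acc
          simp only [List.length_nil, Nat.cast_zero, zero_add] at hfold
          rw [hfold]
          by_cases h0 : (scan_close rest (i + 1) 1).2.1 = 0
          · rw [if_pos h0, if_pos h0]
            -- recursive call on the unconsumed rest
            obtain ⟨t, ht1, ht2, ht3⟩ := scan_close_spec rest (i + 1) 1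
            have hlen : (scan_close rest (i + 1) 1).2.2.length ≤ N := by
              have := scan_close_len_le rest (i + 1) 1
              simp at hN; omega
            refine ih _ hlen _ _ ?_
            -- transfer the balance hypothesis across the consumed balanced prefix '(' :: t
            intro n
            have hcnt : (t.count ')' : Int) = t.count '(' + 1 := by
              rw [h0] at ht3; omega
            have := hbal (1 + t.length + n)
            rw [show (c :: rest).take (1 + t.length + n)
                  = c :: (t ++ (scan_close rest (i + 1) 1).2.2.take n) by
              conv_lhs => rw [ht1]
              rw [show 1 + t.length + n = (t.length + n) + 1 from by omega,
                List.take_succ_cons, List.take_length_add_append]] at this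
            simp [List.count_append, hop] at this ⊢
            omega
          · rw [if_neg h0, if_neg h0]
            rw [scan_close_rest_nil rest (i + 1) 1 one_ne_zero h0]
            simp [find_parens_outer]
        · rw [PySem.List.enumerate_cons]
          simp only [List.foldl_cons]
          rw [show find_parens_step (acc, ([] : List Int)) (i, c) = (acc, []) by
            simp [find_parens_step, hop, hcl]]

          rw [show find_parens_outer (c :: rest) i acc = find_parens_outer rest (i + 1) acc by
            rw [find_parens_outer]; simp [hop, hcl]]
          refine ih _ (by simp at hN; omega) _ _ ?_
          intro n
          have := hbal (n + 1)
          simpa [List.count_cons, hop, hcl] using this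

-- bound version of Pre_ → unbounded prefix condition
lemma pre_unbounded (s : String) (h : Pre_find_parens s) :
    ∀ n : Nat, (s.toList.take n).count ')' ≤ (s.toList.take n).count '(' := by
  intro n
  by_cases hn : n ≤ s.toList.length
  · exact h n (List.mem_range.mpr (by omega))
  · have h2 := h s.toList.length (List.mem_range.mpr (by omega))
    rw [List.take_length] at h2
    rwa [List.take_of_length_le (by omega)]

-- ===== VERDICT (by name: the statement is the Claim_ definition above) =====
theorem find_parens_spec : Claim_equal_find_parens := by
  intro s _ hpre
  unfold Spec_find_parens find_parens find_parens_alt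
  exact top_equiv s.toList.length s.toList (le_refl _) 0 [] (pre_unbounded s hpre)
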